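-- pv_equiv track=rewrite | github.com/netor27/codefights-arcade-solutions | arcade/python/arcade-theCore/13_WaterfallOfIntegration/112_Is Information Consistent.py | isInformationConsistent
-- ===== SOURCE A (Python) =====
-- def isInformationConsistent(evidences):
--     for j in range(len(evidences[0])):
--         aux = 0
--         for i in range(len(evidences)):
--             if evidences[i][j] != 0:
--                 if aux == 0:
--                     aux = evidences[i][j]
--                 elif aux != evidences[i][j]:
--                     return False
--     return True
-- ===== SOURCE B (Python) =====
-- def isInformationConsistent(evidences):
--     consensus = [0] * len(evidences[0])
--     for row in evidences:
--         consensus = [c if c != 0 else v for c, v in zip(consensus, row)]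
--     return all(v == 0 or v == c
--                for row in evidences
--                for c, v in zip(consensus, row))
-- ===== Notes on version B (the rewrite author's own statement) =====
-- stated objective: alternative
-- what changed: B is a two-stage row-wise algorithm: it folds all rows into a single consensus row (per cell keeping the first nonzero value seen) and then verifies every row cell-by-cell against that consensus, replacing A's column-by-column scan with a running sentinel and early exit.
-- outside the precondition, e.g. on isInformationConsistent([]): A raises IndexError, B raises IndexError; on isInformationConsistent([[0, 1], [2]]): A raises IndexError, B returns True; on isInformationConsistent([[1, 2], [3, 0], []]): A returns False, B returns True
import Mathlib
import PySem

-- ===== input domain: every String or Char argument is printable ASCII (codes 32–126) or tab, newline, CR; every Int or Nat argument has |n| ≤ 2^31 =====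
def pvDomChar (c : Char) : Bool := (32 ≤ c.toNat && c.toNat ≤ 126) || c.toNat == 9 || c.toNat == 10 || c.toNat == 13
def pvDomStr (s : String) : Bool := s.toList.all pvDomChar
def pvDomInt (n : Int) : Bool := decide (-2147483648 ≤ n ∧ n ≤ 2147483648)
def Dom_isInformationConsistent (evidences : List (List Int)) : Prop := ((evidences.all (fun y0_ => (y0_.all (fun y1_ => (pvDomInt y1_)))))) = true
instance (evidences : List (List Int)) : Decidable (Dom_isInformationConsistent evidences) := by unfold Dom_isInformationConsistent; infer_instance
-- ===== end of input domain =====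

-- B replaces A's column-by-column sentinel scan by a two-stage row-wise algorithm: fold all rows
-- into one consensus row (per cell, first nonzero seen), then verify every row against it
-- (objective: alternative; same cost).

-- ===== PORT A =====
-- inner 'for i' loop: state = some aux, none = early 'return False'
def pvStep (st : Option Int) (v : Int) : Option Int :=
  match st with
  | none => none
  | some aux =>
    if v ≠ 0 then
      if aux = 0 then some v
      else if aux ≠ v then none
      else some aux
    else some aux

def isInformationConsistent (evidences : List (List Int)) : Bool :=
  (List.range (evidences.getD 0 []).length).all (fun j =>
    ((List.range evidences.length).foldl
      (fun st i => pvStep st ((evidences.getD i []).getD j 0)) (some (0 : Int))).isSome)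

-- ===== PORT B =====
-- '[c if c != 0 else v for c, v in zip(consensus, row)]'
def pvMerge (c r : List Int) : List Int :=
  (c.zip r).map (fun p => if p.1 ≠ 0 then p.1 else p.2)

def isInformationConsistent_alt (evidences : List (List Int)) : Bool :=
  let consensus :=
    evidences.foldl pvMerge (List.replicate (evidences.getD 0 []).length (0 : Int))
  evidences.all (fun row =>
    (consensus.zip row).all (fun p => p.2 == 0 || p.2 == p.1))

-- ===== PRECONDITION & SPEC =====
-- Pre_ restricts to the natural domain: a nonempty matrix whose rows all reach the first row's
-- length. Outside it A raises IndexError on the short row (or, if an inconsistency is found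
-- first, returns False mid-scan), while B judges the zip-truncated columns.
def Pre_isInformationConsistent (evidences : List (List Int)) : Prop :=
  evidences ≠ [] ∧ ∀ r ∈ evidences, evidences.headI.length ≤ r.length
instance (evidences : List (List Int)) : Decidable (Pre_isInformationConsistent evidences) := by
  unfold Pre_isInformationConsistent; infer_instance

def pvWitness_isInformationConsistent : List (List Int) := [[1, 0], [0, 2], [1, 2]]

def Spec_isInformationConsistent (evidences : List (List Int)) (out : Bool) : Prop :=
  out = isInformationConsistent_alt evidences
instance (evidences : List (List Int)) (out : Bool) : Decidable (Spec_isInformationConsistent evidences out) := by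
  unfold Spec_isInformationConsistent; infer_instance

-- ===== CLAIM (what is proved, stated in full; the proofs are below) =====
def Claim_equal_isInformationConsistent : Prop := ∀ (evidences : List (List Int)), Dom_isInformationConsistent evidences → Pre_isInformationConsistent evidences → Spec_isInformationConsistent evidences (isInformationConsistent evidences)

-- ===== LEMMAS AND PROOFS =====

-- first nonzero of a column (0 if none): what B's merge computes per cell
def pvColStep (c v : Int) : Int := if c ≠ 0 then c else v
def pvFirstNZ (vs : List Int) : Int := vs.foldl pvColStep 0

-- index loop over range xs.length reading xs.getD = fold over xs itself
theorem pv_foldl_range_getD {α β : Type} (xs : List α) (d : α) (f : β → α → β) (init : β) :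
    (List.range xs.length).foldl (fun acc i => f acc (xs.getD i d)) init = xs.foldl f init := by
  induction xs generalizing init with
  | nil => rfl
  | cons x t ih =>
    simp only [List.length_cons, List.range_succ_eq_map, List.foldl_cons, List.foldl_map,
      List.getD_cons_zero, List.getD_cons_succ]
    exact ih (f init x)

theorem pv_step_zero (st : Option Int) : pvStep st 0 = st := by
  cases st <;> simp [pvStep]

theorem pv_foldl_step_filter (vs : List Int) (st : Option Int) :
    vs.foldl pvStep st = (vs.filter (fun v => v != 0)).foldl pvStep st := by
  induction vs generalizing st with
  | nil => rfl
  | cons v t ih =>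
    by_cases h : v = 0
    · subst h; simpa [pv_step_zero] using ih st
    · simp [h, ih]

theorem pv_foldl_step_none (vs : List Int) : vs.foldl pvStep none = none := by
  induction vs with
  | nil => rfl
  | cons v t ih => simpa [pvStep] using ih

theorem pv_foldl_step_aux (ns : List Int) (a : Int) (ha : a ≠ 0)
    (hns : ∀ v ∈ ns, v ≠ 0) :
    (ns.foldl pvStep (some a)).isSome = ns.all (fun v => v == a) := by
  induction ns with
  | nil => rfl
  | cons v t ih =>
    have hv : v ≠ 0 := hns v (by simp)
    have ht : ∀ x ∈ t, x ≠ 0 := fun x hx => hns x (by simp [hx])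
    by_cases hav : a = v
    · subst hav; simpa [pvStep, hv, ha] using ih ht
    · have hva : (v == a) = false := by
        simp only [beq_eq_false_iff_ne, ne_eq]
        exact fun h => hav h.symm
      simp [pvStep, hv, ha, hav, pv_foldl_step_none, hva]

theorem pv_colStep_zero (c : Int) : pvColStep c 0 = c := by
  by_cases h : c = 0 <;> simp [pvColStep, h]

theorem pv_foldl_colStep_ne (vs : List Int) (c : Int) (hc : c ≠ 0) :
    vs.foldl pvColStep c = c := by
  induction vs with
  | nil => rfl
  | cons v t ih => simpa [pvColStep, hc] using ih

theorem pv_foldl_colStep_filter (vs : List Int) (c : Int) :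
    vs.foldl pvColStep c = (vs.filter (fun v => v != 0)).foldl pvColStep c := by
  induction vs generalizing c with
  | nil => rfl
  | cons v t ih =>
    by_cases h : v = 0
    · subst h; simpa [pv_colStep_zero] using ih c
    · simp [h, ih]

theorem pv_firstNZ_filter (vs : List Int) :
    pvFirstNZ vs = pvFirstNZ (vs.filter (fun v => v != 0)) := by
  unfold pvFirstNZ
  exact pv_foldl_colStep_filter vs 0

theorem pv_all_congr {α : Type} (l : List α) (p q : α → Bool) (h : ∀ x ∈ l, p x = q x) :
    l.all p = l.all q := by
  induction l with
  | nil => rfl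
  | cons a t ih =>
    simp only [List.all_cons, h a (by simp), ih (fun x hx => h x (by simp [hx]))]

theorem pv_all_zero_or (vs : List Int) (q : Int → Bool) :
    vs.all (fun v => v == 0 || q v) = (vs.filter (fun v => v != 0)).all q := by
  induction vs with
  | nil => rfl
  | cons v t ih =>
    by_cases h : v = 0
    · subst h; simpa using ih
    · have hv : (v == 0) = false := by simpa using h
      have hv' : (v != 0) = true := by simpa using h
      simp only [List.all_cons, hv, Bool.false_or, List.filter_cons, hv', ih]
      simp

-- A's per-column loop equals: every cell is 0 or equals the column's first nonzero value
theorem pv_column (vs : List Int) :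
    (vs.foldl pvStep (some 0)).isSome = vs.all (fun v => v == 0 || v == pvFirstNZ vs) := by
  rw [pv_foldl_step_filter, pv_firstNZ_filter, pv_all_zero_or]
  have hall : ∀ v ∈ vs.filter (fun v => v != 0), v ≠ 0 := by
    intro v hv; simpa using (List.mem_filter.1 hv).2
  rcases hf : vs.filter (fun v => v != 0) with _ | ⟨a, t⟩
  · rfl
  · rw [hf] at hall
    have ha : a ≠ 0 := hall a (by simp)
    have ht : ∀ x ∈ t, x ≠ 0 := fun x hx => hall x (by simp [hx])
    have hfz : pvFirstNZ (a :: t) = a := by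
      unfold pvFirstNZ
      rw [List.foldl_cons, show pvColStep 0 a = a by simp [pvColStep]]
      exact pv_foldl_colStep_ne t a ha
    rw [hfz]
    simp only [List.foldl_cons, List.all_cons, beq_self_eq_true, Bool.true_and]
    have hstep : pvStep (some 0) a = some a := by simp [pvStep, ha]
    rw [hstep, pv_foldl_step_aux t a ha ht]

theorem pv_merge_length (c r : List Int) : (pvMerge c r).length = min c.length r.length := by
  simp [pvMerge]

theorem pv_merge_getD (c r : List Int) (j : Nat) (h1 : j < c.length) (h2 : j < r.length) :
    (pvMerge c r).getD j 0 = pvColStep (c.getD j 0) (r.getD j 0) := by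
  have hlen : j < (pvMerge c r).length := by
    rw [pv_merge_length]; omega
  rw [List.getD_eq_getElem _ _ hlen, List.getD_eq_getElem _ _ h1, List.getD_eq_getElem _ _ h2]
  simp [pvMerge, pvColStep]

-- B's consensus fold, read pointwise: it is a per-column fold of pvColStep
theorem pv_fold_merge (rows : List (List Int)) (init : List Int)
    (h : ∀ r ∈ rows, init.length ≤ r.length) :
    (rows.foldl pvMerge init).length = init.length ∧
    ∀ j, j < init.length →
      (rows.foldl pvMerge init).getD j 0
        = rows.foldl (fun c r => pvColStep c (r.getD j 0)) (init.getD j 0) := by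
  induction rows generalizing init with
  | nil => exact ⟨rfl, fun _ _ => rfl⟩
  | cons r t ih =>
    have hr : init.length ≤ r.length := h r (by simp)
    have ht : ∀ s ∈ t, (pvMerge init r).length ≤ s.length := by
      intro s hs
      rw [pv_merge_length]
      exact le_trans (by omega) (h s (by simp [hs]))
    obtain ⟨ihl, ihg⟩ := ih (pvMerge init r) ht
    have hml : (pvMerge init r).length = init.length := by
      rw [pv_merge_length]; omega
    refine ⟨by simpa [hml] using ihl, ?_⟩
    intro j hj
    have hj' : j < (pvMerge init r).length := by omega
    simp only [List.foldl_cons]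
    rw [ihg j hj', pv_merge_getD init r j hj (by omega)]

-- zip-all rewritten as an index loop over the left length
theorem pv_all_zip (c r : List Int) (h : c.length ≤ r.length) (p : Int → Int → Bool) :
    (c.zip r).all (fun q => p q.1 q.2)
      = (List.range c.length).all (fun j => p (c.getD j 0) (r.getD j 0)) := by
  induction c generalizing r with
  | nil => rfl
  | cons x t ih =>
    cases r with
    | nil => simp at h
    | cons y s =>
      simp only [List.zip_cons_cons, List.all_cons, List.length_cons,
        List.range_succ_eq_map, List.all_map, List.getD_cons_zero]
      rw [ih s (by simpa using h)]
      congr 1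

theorem pv_all_swap {α β : Type} (xs : List α) (ys : List β) (p : α → β → Bool) :
    xs.all (fun x => ys.all (fun y => p x y)) = ys.all (fun y => xs.all (fun x => p x y)) := by
  rw [Bool.eq_iff_iff]
  simp only [List.all_eq_true]
  tauto

theorem pv_foldl_map_getD (rows : List (List Int)) (j : Nat) (x : Int) :
    rows.foldl (fun c r => pvColStep c (r.getD j 0)) x
      = (rows.map (fun r => r.getD j 0)).foldl pvColStep x := by
  rw [List.foldl_map]

-- ===== VERDICT (by name: the statement is the Claim_ definition above) =====
theorem isInformationConsistent_spec : Claim_equal_isInformationConsistent := by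
  intro evidences _ hpre
  obtain ⟨hne, hrows⟩ := hpre
  unfold Spec_isInformationConsistent isInformationConsistent isInformationConsistent_alt
  have hhead : evidences.getD 0 [] = evidences.headI := by
    cases evidences with
    | nil => exact absurd rfl hne
    | cons r rs => rfl
  rw [hhead]
  set m := evidences.headI.length with hm
  have hrep : (List.replicate m (0 : Int)).length = m := by simp
  obtain ⟨hclen, hcget⟩ :=
    pv_fold_merge evidences (List.replicate m 0) (by intro r hr; rw [hrep]; exact hrows r hr)
  set consensus := evidences.foldl pvMerge (List.replicate m (0 : Int)) with hc
  -- rewrite B as an index loop over range m, columns outermost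
  have hB : evidences.all (fun row => (consensus.zip row).all (fun p => p.2 == 0 || p.2 == p.1))
      = (List.range m).all (fun j => evidences.all (fun row =>
          (row.getD j 0 == 0 || row.getD j 0 == consensus.getD j 0))) := by
    rw [← pv_all_swap]
    refine pv_all_congr _ _ _ ?_
    intro row hrow
    have hlen : consensus.length ≤ row.length := by
      rw [hclen, hrep]; exact hrows row hrow
    rw [pv_all_zip consensus row hlen (fun a b => b == 0 || b == a), hclen, hrep]
  rw [hB]
  refine pv_all_congr _ _ _ ?_
  intro j hj
  have hjm : j < m := List.mem_range.1 hj
  -- A's side: index loops → fold over the column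
  rw [pv_foldl_range_getD evidences [] (fun st r => pvStep st (r.getD j 0)) (some 0)]
  have hAcol : evidences.foldl (fun st r => pvStep st (r.getD j 0)) (some (0 : Int))
      = (evidences.map (fun r => r.getD j 0)).foldl pvStep (some 0) := by
    rw [List.foldl_map]
  rw [hAcol, pv_column]
  -- B's side: consensus cell = first nonzero of the column
  have hcj : consensus.getD j 0 = pvFirstNZ (evidences.map (fun r => r.getD j 0)) := by
    rw [hcget j (by rwa [hrep]), pv_foldl_map_getD]
    have hz : (List.replicate m (0 : Int)).getD j 0 = 0 := by
      simp only [List.getD, List.getElem?_replicate]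
      split <;> rfl
    rw [hz]; rfl
  rw [hcj, List.all_map]
  rfl
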